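-- pv_equiv track=rewrite | github.com/BicomeAdmin/Line-Agent | scripts/start_lark_long_connection.py | _extract_codex_tail
-- ===== SOURCE A (Python) =====
-- def _extract_codex_tail(stdout: str) -> str:
--     """Best-effort: pull the final assistant text from codex exec stdout."""
--
--     lines = stdout.splitlines()
--     # Find the last "codex" header line and take everything after up to "tokens used".
--     last_codex_idx = -1
--     for i, line in enumerate(lines):
--         if line.strip() == "codex":
--             last_codex_idx = i
--     if last_codex_idx == -1:
--         return stdout.strip()[-500:]
--     tail = []
--     for line in lines[last_codex_idx + 1:]:
--         if line.startswith("tokens used") or line.startswith("--------"):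
--             break
--         if "ERROR codex_core::" in line:
--             continue
--         tail.append(line)
--     return "\n".join(tail).strip()[-1000:]
-- ===== SOURCE B (Python) =====
-- def _extract_codex_tail(stdout: str) -> str:
--     """Best-effort: pull the final assistant text from codex exec stdout."""
--
--     buf = []
--     collecting = False
--     seen_codex = False
--     for line in stdout.splitlines():
--         if line.strip() == "codex":
--             buf = []
--             collecting = True
--             seen_codex = True
--         elif collecting:
--             if line.startswith("tokens used") or line.startswith("--------"):
--                 collecting = False
--             elif "ERROR codex_core::" in line:
--                 pass
--             else:
--                 buf.append(line)
--     if not seen_codex: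
--         return stdout.strip()[-500:]
--     return "\n".join(buf).strip()[-1000:]
-- ===== Notes on version B (the rewrite author's own statement) =====
-- stated objective: simpler
-- what changed: Replaced A's two passes (an enumerate scan for the last 'codex' header index, then a second loop over the sliced tail) by a single linear pass over the lines maintaining a tail buffer and collecting/seen flags, with no index bookkeeping or slicing.
import Mathlib
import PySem

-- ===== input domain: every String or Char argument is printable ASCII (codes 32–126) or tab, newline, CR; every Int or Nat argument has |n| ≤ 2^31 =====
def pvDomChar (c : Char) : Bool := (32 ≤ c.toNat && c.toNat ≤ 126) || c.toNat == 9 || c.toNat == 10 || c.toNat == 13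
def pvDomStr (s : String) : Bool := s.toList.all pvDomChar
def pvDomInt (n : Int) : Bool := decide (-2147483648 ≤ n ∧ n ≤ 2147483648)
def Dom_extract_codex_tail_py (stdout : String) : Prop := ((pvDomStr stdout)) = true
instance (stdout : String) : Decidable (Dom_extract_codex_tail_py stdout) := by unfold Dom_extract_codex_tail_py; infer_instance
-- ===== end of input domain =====

-- B replaces A's two passes (find last "codex" header index, then re-scan the slice after it)
-- by one linear pass with a buffer and collecting/seen flags; objective: simpler.

-- shared line predicates (each is the port of the corresponding Python test, used verbatim by both sides)
def pvIsHdr (l : String) : Bool := PySem.Str.strip l == "codex"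
def pvIsTerm (l : String) : Bool := PySem.Str.startswith l "tokens used" || PySem.Str.startswith l "--------"
def pvIsErr (l : String) : Bool := PySem.Str.isIn "ERROR codex_core::" l

-- ===== PORT A =====
-- 'for i, line in enumerate(lines): if line.strip() == "codex": last_codex_idx = i'
def pvLastIdxAux : List String → Int → Int → Int
  | [], _, last => last
  | l :: ls, i, last => pvLastIdxAux ls (i + 1) (if pvIsHdr l then i else last)

-- the second loop with break/continue, as structural recursion
def pvCollectA : List String → List String
  | [] => []
  | l :: ls => if pvIsTerm l then [] else if pvIsErr l then pvCollectA ls else l :: pvCollectA ls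

def extract_codex_tail_py (stdout : String) : String :=
  let lines := PySem.Str.splitlines stdout
  let idx := pvLastIdxAux lines 0 (-1)
  if idx == -1 then PySem.Str.slice (PySem.Str.strip stdout) (some (-500)) none
  else
    let tail := pvCollectA (PySem.List.slice lines (some (idx + 1)) none)
    PySem.Str.slice (PySem.Str.strip (PySem.Str.join "\n" tail)) (some (-1000)) none

-- ===== PORT B =====
-- one pass; state = (buffer, collecting, seen_codex)
def pvRunB : List String → List String × Bool × Bool → List String × Bool × Bool
  | [], st => st
  | l :: ls, (buf, coll, seen) =>
    if pvIsHdr l then pvRunB ls ([], true, true)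
    else if coll then
      if pvIsTerm l then pvRunB ls (buf, false, seen)
      else if pvIsErr l then pvRunB ls (buf, coll, seen)
      else pvRunB ls (buf ++ [l], coll, seen)
    else pvRunB ls (buf, coll, seen)

def extract_codex_tail_py_alt (stdout : String) : String :=
  let st := pvRunB (PySem.Str.splitlines stdout) ([], false, false)
  if !st.2.2 then PySem.Str.slice (PySem.Str.strip stdout) (some (-500)) none
  else PySem.Str.slice (PySem.Str.strip (PySem.Str.join "\n" st.1)) (some (-1000)) none

-- ===== PRECONDITION & SPEC =====
def Spec_extract_codex_tail_py (stdout : String) (out : String) : Prop := out = extract_codex_tail_py_alt stdout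
instance (stdout : String) (out : String) : Decidable (Spec_extract_codex_tail_py stdout out) := by unfold Spec_extract_codex_tail_py; infer_instance

-- ===== CLAIM (what is proved, stated in full; the proofs are below) =====
def Claim_equal_extract_codex_tail_py : Prop := ∀ (stdout : String), Dom_extract_codex_tail_py stdout → Spec_extract_codex_tail_py stdout (extract_codex_tail_py stdout)

-- ===== LEMMAS AND PROOFS =====

-- the segment of lines strictly after the LAST header line, if any
def pvAfterLast : List String → Option (List String)
  | [] => none
  | l :: ls =>
    match pvAfterLast ls with
    | some t => some t
    | none => if pvIsHdr l then some ls else none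

theorem pvAfterLast_none {ls : List String} (h : pvAfterLast ls = none) :
    ∀ l ∈ ls, pvIsHdr l = false := by
  induction ls with
  | nil => simp
  | cons l ls ih =>
    intro x hx
    rcases hrec : pvAfterLast ls with _ | t
    · simp only [pvAfterLast, hrec] at h
      rcases List.mem_cons.mp hx with rfl | hx
      · by_contra hc
        simp [eq_true_of_ne_false hc] at h
      · exact ih hrec x hx
    · simp only [pvAfterLast, hrec] at h
      simp at h

theorem pvLastIdxAux_none {ls : List String} (h : pvAfterLast ls = none) :
    ∀ (i last0 : Int), pvLastIdxAux ls i last0 = last0 := by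
  induction ls with
  | nil => intro i last0; rfl
  | cons l ls ih =>
    intro i last0
    have hl : pvIsHdr l = false := pvAfterLast_none h l (by simp)
    have hls : pvAfterLast ls = none := by
      rcases hrec : pvAfterLast ls with _ | t
      · rfl
      · simp only [pvAfterLast, hrec] at h
        simp at h
    simp [pvLastIdxAux, hl, ih hls]

theorem pvLastIdxAux_some {ls : List String} {t : List String}
    (h : pvAfterLast ls = some t) :
    ∀ (i : Nat) (last0 : Int), ∃ k : Nat,
      pvLastIdxAux ls (i : Int) last0 = ((i + k : Nat) : Int) ∧ ls.drop (k + 1) = t := by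
  induction ls with
  | nil => simp [pvAfterLast] at h
  | cons l ls ih =>
    intro i last0
    rcases hrec : pvAfterLast ls with _ | t'
    · simp only [pvAfterLast, hrec] at h
      have hl : pvIsHdr l = true := by
        by_contra hc
        simp [Bool.eq_false_iff.mpr hc] at h
      obtain rfl : ls = t := by simpa [hl] using h
      refine ⟨0, ?_, by simp⟩
      have hstep : pvLastIdxAux (l :: ls) (i : Int) last0
          = pvLastIdxAux ls ((i : Int) + 1) (i : Int) := by
        simp [pvLastIdxAux, hl]
      rw [hstep, pvLastIdxAux_none hrec]
      simp
    · simp only [pvAfterLast, hrec] at h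
      obtain rfl : t' = t := by simpa using h
      obtain ⟨k, hk1, hk2⟩ := ih hrec (i + 1) (if pvIsHdr l then (i : Int) else last0)
      refine ⟨k + 1, ?_, by simpa using hk2⟩
      have hstep : pvLastIdxAux (l :: ls) (i : Int) last0
          = pvLastIdxAux ls ((i : Int) + 1) (if pvIsHdr l then (i : Int) else last0) := by
        simp [pvLastIdxAux]
      rw [hstep]
      have hcast : ((i : Int) + 1) = ((i + 1 : Nat) : Int) := by push_cast; ring
      rw [hcast, hk1]
      push_cast; ring

theorem pvRunB_noHdr_false {ls : List String} (h : ∀ l ∈ ls, pvIsHdr l = false) :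
    ∀ (buf : List String) (s : Bool), pvRunB ls (buf, false, s) = (buf, false, s) := by
  induction ls with
  | nil => intro buf s; rfl
  | cons l ls ih =>
    intro buf s
    have hl := h l (by simp)
    simp [pvRunB, hl, ih (fun x hx => h x (by simp [hx]))]

theorem pvRunB_noHdr_true {ls : List String} (h : ∀ l ∈ ls, pvIsHdr l = false) :
    ∀ (buf : List String) (s : Bool),
      pvRunB ls (buf, true, s) = (buf ++ pvCollectA ls, !ls.any pvIsTerm, s) := by
  induction ls with
  | nil => intro buf s; simp [pvRunB, pvCollectA]
  | cons l ls ih =>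
    intro buf s
    have hl := h l (by simp)
    have hrest : ∀ x ∈ ls, pvIsHdr x = false := fun x hx => h x (by simp [hx])
    by_cases ht : pvIsTerm l = true
    · simp [pvRunB, hl, ht, pvCollectA, pvRunB_noHdr_false hrest]
    · have ht' : pvIsTerm l = false := Bool.eq_false_iff.mpr ht
      by_cases he : pvIsErr l = true
      · simp [pvRunB, hl, ht', he, pvCollectA, ih hrest]
      · have he' : pvIsErr l = false := Bool.eq_false_iff.mpr he
        simp [pvRunB, hl, ht', he', pvCollectA, ih hrest]

theorem pvRunB_some {ls t : List String} (h : pvAfterLast ls = some t) :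
    ∀ (buf : List String) (c s : Bool),
      pvRunB ls (buf, c, s) = (pvCollectA t, !t.any pvIsTerm, true) := by
  induction ls with
  | nil => simp [pvAfterLast] at h
  | cons l ls ih =>
    intro buf c s
    rcases hrec : pvAfterLast ls with _ | t'
    · simp only [pvAfterLast, hrec] at h
      have hl : pvIsHdr l = true := by
        by_contra hc
        simp [Bool.eq_false_iff.mpr hc] at h
      obtain rfl : ls = t := by simpa [hl] using h
      have hfree := pvAfterLast_none hrec
      simp [pvRunB, hl, pvRunB_noHdr_true hfree]
    · simp only [pvAfterLast, hrec] at h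
      obtain rfl : t' = t := by simpa using h
      by_cases hl : pvIsHdr l = true
      · simp [pvRunB, hl, ih hrec]
      · have hl' : pvIsHdr l = false := Bool.eq_false_iff.mpr hl
        by_cases hc : c = true
        · subst hc
          by_cases ht : pvIsTerm l = true
          · simp [pvRunB, hl', ht, ih hrec]
          · have ht' : pvIsTerm l = false := Bool.eq_false_iff.mpr ht
            by_cases he : pvIsErr l = true
            · simp [pvRunB, hl', ht', he, ih hrec]
            · have he' : pvIsErr l = false := Bool.eq_false_iff.mpr he
              simp [pvRunB, hl', ht', he', ih hrec]
        · have hc' : c = false := by simpa using hc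
          subst hc'
          simp [pvRunB, hl', ih hrec]

-- ===== VERDICT (by name: the statement is the Claim_ definition above) =====
theorem extract_codex_tail_py_spec : Claim_equal_extract_codex_tail_py := by
  intro stdout _
  unfold Spec_extract_codex_tail_py extract_codex_tail_py extract_codex_tail_py_alt
  set lines := PySem.Str.splitlines stdout with hlines
  rcases hAL : pvAfterLast lines with _ | t
  · -- no header: A's index is -1, B never sees one
    have hidx : pvLastIdxAux lines 0 (-1) = -1 := pvLastIdxAux_none hAL 0 (-1)
    have hB : pvRunB lines ([], false, false) = ([], false, false) :=
      pvRunB_noHdr_false (pvAfterLast_none hAL) [] false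
    simp [hidx, hB]
  · -- header present: A collects after the last header index; B's buffer is the same
    obtain ⟨k, hk1, hk2⟩ := pvLastIdxAux_some hAL 0 (-1)
    have hk1' : pvLastIdxAux lines 0 (-1) = ((k : Nat) : Int) := by simpa using hk1
    have hB : pvRunB lines ([], false, false) = (pvCollectA t, !t.any pvIsTerm, true) :=
      pvRunB_some hAL [] false false
    have hne : (((k : Nat) : Int) == -1) = false := by
      rw [beq_eq_false_iff_ne]
      omega
    have hslice : PySem.List.slice lines (some (((k : Nat) : Int) + 1)) none = lines.drop (k + 1) := by
      have hcast : ((k : Nat) : Int) + 1 = ((k + 1 : Nat) : Int) := by push_cast; ring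
      rw [hcast, PySem.List.slice_from_natCast]
    simp only [hk1', hne, hB, hslice, hk2]
    simp
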